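-- pv_equiv track=rewrite | github.com/CuriousCI/university | python/homework/2-required/topgcacheless.py | list_of_weights_to_number
-- ===== SOURCE A (Python) =====
-- def list_of_weights_to_number(weights: list[int]) -> int:
--     if len(weights) <= 10:
--         total: int = weights[-1]
--         for index in range(len(weights) - 1):
--             if weights[index] < weights[index + 1]:
--                 total -= weights[index]
--             else:
--                 total += weights[index]
--         return total
--
--     return sum([-x if x < y else x for x, y in zip(weights, weights[1:])]) + weights[-1]
-- ===== SOURCE B (Python) =====
-- def list_of_weights_to_number(weights: list[int]) -> int:
--     last = weights[-1]
--     total = sum(weights[:-1])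
--     drop = sum(x for x, y in zip(weights, weights[1:]) if x < y)
--     return last + total - 2 * drop
-- ===== Notes on version B (the rewrite author's own statement) =====
-- stated objective: alternative
-- what changed: Replaces A's per-element sign decision (index loop / signed comprehension) by three separate reductions: last element + plain sum of the non-last elements - twice the sum of elements strictly smaller than their successor.
import Mathlib
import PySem

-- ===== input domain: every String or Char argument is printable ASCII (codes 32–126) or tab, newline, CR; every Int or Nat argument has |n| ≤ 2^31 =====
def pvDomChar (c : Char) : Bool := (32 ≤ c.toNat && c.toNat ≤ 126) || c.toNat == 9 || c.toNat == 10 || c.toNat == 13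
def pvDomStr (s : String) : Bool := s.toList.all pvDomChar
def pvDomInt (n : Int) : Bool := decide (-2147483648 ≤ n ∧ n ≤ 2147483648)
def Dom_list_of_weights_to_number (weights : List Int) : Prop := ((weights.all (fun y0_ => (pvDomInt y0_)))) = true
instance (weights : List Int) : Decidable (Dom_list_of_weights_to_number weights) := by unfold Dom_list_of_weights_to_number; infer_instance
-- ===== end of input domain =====

-- B computes the same value by three separate reductions (last + sum of non-last
-- elements - 2 * sum of elements strictly below their successor) instead of A's
-- per-element sign decision; same O(n) cost ("alternative").

-- ===== PORT A =====
-- weights[-1] is total on nonempty lists only; Pre_ excludes [], where Python raises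
-- IndexError, so the .getD 0 default is never observed inside the claim.
def list_of_weights_to_number (weights : List Int) : Int :=
  if weights.length ≤ 10 then
    (PySem.List.pyRange 0 ((weights.length : Int) - 1) 1).foldl
      (fun total index =>
        if PySem.List.pyGetD weights index 0 < PySem.List.pyGetD weights (index + 1) 0 then
          total - PySem.List.pyGetD weights index 0
        else
          total + PySem.List.pyGetD weights index 0)
      ((PySem.List.pyGet? weights (-1)).getD 0)
  else
    ((weights.zip (PySem.List.slice weights (some 1) none)).map
        (fun p => if p.1 < p.2 then -p.1 else p.1)).sum
      + (PySem.List.pyGet? weights (-1)).getD 0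

-- ===== PORT B =====
def list_of_weights_to_number_alt (weights : List Int) : Int :=
  let last := (PySem.List.pyGet? weights (-1)).getD 0
  let total := (PySem.List.slice weights none (some (-1))).sum
  let drop := (((weights.zip (PySem.List.slice weights (some 1) none)).filter
      (fun p => p.1 < p.2)).map (fun p => p.1)).sum
  last + total - 2 * drop

-- ===== PRECONDITION & SPEC =====
-- Pre_ excludes only the empty list, on which Python A (and B) raise IndexError at weights[-1].
def Pre_list_of_weights_to_number (weights : List Int) : Prop := weights ≠ []
instance (weights : List Int) : Decidable (Pre_list_of_weights_to_number weights) := by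
  unfold Pre_list_of_weights_to_number; infer_instance
def pvWitness_list_of_weights_to_number : List Int := [3, 1, 4, 1, 5]

def Spec_list_of_weights_to_number (weights : List Int) (out : Int) : Prop := out = list_of_weights_to_number_alt weights
instance (weights : List Int) (out : Int) : Decidable (Spec_list_of_weights_to_number weights out) := by unfold Spec_list_of_weights_to_number; infer_instance

-- ===== CLAIM (what is proved, stated in full; the proofs are below) =====
def Claim_equal_list_of_weights_to_number : Prop := ∀ (weights : List Int), Dom_list_of_weights_to_number weights → Pre_list_of_weights_to_number weights → Spec_list_of_weights_to_number weights (list_of_weights_to_number weights)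

-- ===== LEMMAS AND PROOFS =====

-- The signed adjacent-pair sum decomposes into (sum of non-last elements) minus
-- twice the sum of the elements strictly below their successor.
theorem pv_core (w : List Int) :
    ((w.zip w.tail).map (fun p => if p.1 < p.2 then -p.1 else p.1)).sum
      = w.dropLast.sum
        - 2 * (((w.zip w.tail).filter (fun p => p.1 < p.2)).map (fun p => p.1)).sum := by
  induction w with
  | nil => simp
  | cons a t ih =>
    cases t with
    | nil => simp
    | cons b t' =>
      simp only [List.tail_cons, List.zip_cons_cons, List.map_cons, List.sum_cons,
        List.filter_cons, List.dropLast_cons₂] at *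
      by_cases h : a < b <;> simp [h, ih] <;> ring

-- A's if-accumulating loop is init + the signed sum of the loop body values.
theorem pv_foldl_signed (l : List Int) (c : Int → Prop) [DecidablePred c]
    (a : Int → Int) (init : Int) :
    l.foldl (fun t i => if c i then t - a i else t + a i) init
      = init + (l.map (fun i => if c i then -(a i) else a i)).sum := by
  induction l generalizing init with
  | nil => simp
  | cons x xs ih =>
    by_cases h : c x <;> simp [h, ih] <;> ring

-- A's index loop body values coincide with the adjacent-pair map.
theorem pv_index_map (w : List Int) :
    (PySem.List.pyRange 0 ((w.length : Int) - 1) 1).map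
        (fun i => if PySem.List.pyGetD w i 0 < PySem.List.pyGetD w (i + 1) 0
          then -(PySem.List.pyGetD w i 0) else PySem.List.pyGetD w i 0)
      = (w.zip w.tail).map (fun p => if p.1 < p.2 then -p.1 else p.1) := by
  apply List.ext_getElem
  · simp [PySem.List.length_pyRange_one, List.length_zip]
    try omega
  · intro k h1 h2
    have hk1 : k < w.length := by
      simp [PySem.List.length_pyRange_one] at h1; omega
    have hk2 : k + 1 < w.length := by
      simp [List.length_zip] at h2; omega
    simp only [List.getElem_map, PySem.List.getElem_pyRange_one, zero_add]
    rw [List.getElem_zip]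
    have c2 : ((k : Int) + 1) = ((k + 1 : Nat) : Int) := by push_cast; ring
    rw [c2, PySem.List.pyGetD_natCast, PySem.List.pyGetD_natCast]
    have e3 : w.tail[k]'(by simp; omega) = w[k + 1] := by
      simp [List.getElem_tail]
    simp [e3, List.getElem?_eq_getElem hk1, List.getElem?_eq_getElem hk2]

-- Both of A's branches equal the adjacent-pair signed sum plus the last element.
theorem pv_A_eq (w : List Int) (_hw : w ≠ []) :
    list_of_weights_to_number w
      = ((w.zip w.tail).map (fun p => if p.1 < p.2 then -p.1 else p.1)).sum
          + (PySem.List.pyGet? w (-1)).getD 0 := by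
  unfold list_of_weights_to_number
  split
  · rw [pv_foldl_signed _ (fun i => PySem.List.pyGetD w i 0 < PySem.List.pyGetD w (i + 1) 0)]
    rw [pv_index_map]
    ring
  · rw [PySem.List.slice_from_one]

theorem list_of_weights_to_number_spec' (w : List Int)
    (_hw : Pre_list_of_weights_to_number w) :
    list_of_weights_to_number w = list_of_weights_to_number_alt w := by
  unfold list_of_weights_to_number_alt
  rw [pv_A_eq w _hw, PySem.List.slice_from_one, PySem.List.slice_to_neg_one, pv_core]
  ring

-- ===== VERDICT (by name: the statement is the Claim_ definition above) =====
theorem list_of_weights_to_number_spec : Claim_equal_list_of_weights_to_number := by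
  intro w _ hw
  exact list_of_weights_to_number_spec' w hw
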